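-- pv_equiv track=rewrite | github.com/Rollpopptery/circuitbloom | learning/pad_pattern_render.py | count_component_pins
-- ===== SOURCE A (Python) =====
-- def count_component_pins(pads):
--     """Count distinct routed pins per component reference.
--
--     Args:
--         pads: list of pad dicts with {ref, pin, ...}
--
--     Returns:
--         dict of ref -> pin count
--     """
--     from collections import defaultdict
--     counts = defaultdict(set)
--     for p in pads:
--         ref = p.get("ref", "")
--         pin = p.get("pin", "")
--         if ref and pin:
--             counts[ref].add(pin)
--     return {ref: len(pins) for ref, pins in counts.items()}
-- ===== SOURCE B (Python) =====
-- def count_component_pins(pads):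
--     """Count distinct routed pins per component reference."""
--     pairs = [(p.get("ref", ""), p.get("pin", "")) for p in pads]
--     counts = {}
--     for i, (ref, pin) in enumerate(pairs):
--         if ref and pin and (ref, pin) not in pairs[:i]:
--             counts[ref] = counts.get(ref, 0) + 1
--     return counts
-- ===== Notes on version B (the rewrite author's own statement) =====
-- stated objective: alternative
-- what changed: A builds a dict of per-ref pin sets while scanning and then measures each set; B uses no set/grouping container at all: it treats a pad's (ref, pin) pair as new only when it does not occur in the prefix of pairs already scanned (a quadratic nested prefix scan), and increments a plain per-ref counter directly for each first occurrence.
import Mathlib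
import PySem

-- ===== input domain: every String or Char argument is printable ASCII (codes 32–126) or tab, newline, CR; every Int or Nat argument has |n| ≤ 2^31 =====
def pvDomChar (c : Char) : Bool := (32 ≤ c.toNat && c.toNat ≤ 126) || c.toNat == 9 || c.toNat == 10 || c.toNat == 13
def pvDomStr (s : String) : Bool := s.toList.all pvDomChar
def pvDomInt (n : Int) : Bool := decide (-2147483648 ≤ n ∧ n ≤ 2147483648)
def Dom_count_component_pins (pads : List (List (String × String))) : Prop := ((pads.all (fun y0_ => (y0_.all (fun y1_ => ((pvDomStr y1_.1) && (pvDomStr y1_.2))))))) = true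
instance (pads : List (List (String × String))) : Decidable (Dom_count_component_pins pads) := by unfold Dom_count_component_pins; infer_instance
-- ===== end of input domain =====

-- B replaces A's dict-of-sets by a quadratic nested prefix scan: a (ref, pin) pair counts only when it
-- is absent from the already-scanned prefix of pairs, incrementing a plain per-ref counter; objective: alternative.


-- ===== PORT A =====
-- p.get(k, "") on a pad dict (shared helper of both ports)
def padGet (p : List (String × String)) (k : String) : String :=
  (PySem.Dict.mk p).getD k ""

-- A: counts = defaultdict(set); for p in pads: if ref and pin: counts[ref].add(pin); then {ref: len(pins)}
def count_component_pins (pads : List (List (String × String))) : List (String × Int) :=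
  (pads.foldl (fun d p =>
      if padGet p "ref" ≠ "" ∧ padGet p "pin" ≠ "" then
        d.modify (padGet p "ref") PySem.Set.empty (fun s => s.add (padGet p "pin"))
      else d)
    (PySem.Dict.empty : PySem.Dict String (PySem.Set String))).items.map
    (fun rp => (rp.1, PySem.Set.len rp.2))

-- ===== PORT B =====
-- B: pairs = [(ref, pin) for p in pads]; for i, (ref, pin) in enumerate(pairs):
--    if ref and pin and (ref, pin) not in pairs[:i]: counts[ref] = counts.get(ref, 0) + 1
def count_component_pins_alt (pads : List (List (String × String))) : List (String × Int) :=
  let pairs := pads.map (fun p => (padGet p "ref", padGet p "pin"))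
  ((PySem.List.enumerate pairs).foldl (fun counts iq =>
      if iq.2.1 ≠ "" ∧ iq.2.2 ≠ "" ∧ iq.2 ∉ PySem.List.slice pairs none (some iq.1) then
        counts.insert iq.2.1 (counts.getD iq.2.1 0 + 1)
      else counts)
    (PySem.Dict.empty : PySem.Dict String Int)).items

-- ===== PRECONDITION & SPEC =====
def Spec_count_component_pins (pads : List (List (String × String))) (out : List (String × Int)) : Prop := out = count_component_pins_alt pads
instance (pads : List (List (String × String))) (out : List (String × Int)) : Decidable (Spec_count_component_pins pads out) := by unfold Spec_count_component_pins; infer_instance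

-- ===== CLAIM (what is proved, stated in full; the proofs are below) =====
def Claim_equal_count_component_pins : Prop := ∀ (pads : List (List (String × String))), Dom_count_component_pins pads → Spec_count_component_pins pads (count_component_pins pads)

-- ===== LEMMAS AND PROOFS =====

-- set(..) of a filtered list is the filtered set: first-occurrence dedup commutes with filter
theorem ofList_filter {α : Type} [BEq α] [LawfulBEq α] (p : α → Bool) (m : List α) :
    PySem.Set.ofList (m.filter p) = (PySem.Set.ofList m).filter p := by
  induction m with
  | nil => rfl
  | cons x t ih =>
    by_cases hx : p x = true
    · simp only [List.filter_cons, hx, if_pos, PySem.Set.ofList_cons, ih, PySem.Set.discard,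
        List.filter_filter]
      congr 1
      exact List.filter_congr (fun y _ => by rw [Bool.and_comm])
    · simp only [List.filter_cons, hx, PySem.Set.ofList_cons, ih, PySem.Set.discard,
        List.filter_filter, if_neg, Bool.false_eq_true, not_false_iff]
      refine List.filter_congr (fun y hy => ?_)
      cases hp : p y with
      | false => simp
      | true =>
        have hyx : (y == x) = false :=
          beq_eq_false_iff_ne.mpr (fun h => hx (h ▸ hp))
        simp [hyx]

-- deduplicating the pairs first does not change set(map f ..): first occurrences survive dedup
theorem ofList_map_ofList {α β : Type} [BEq α] [LawfulBEq α] [BEq β] [LawfulBEq β]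
    (f : α → β) (l : List α) :
    PySem.Set.ofList ((PySem.Set.ofList l).map f) = PySem.Set.ofList (l.map f) := by
  induction l using List.reverseRecOn with
  | nil => rfl
  | append_singleton t x ih =>
    simp only [List.map_append, List.map_cons, List.map_nil, PySem.Set.ofList_append_singleton]
    by_cases hx : x ∈ PySem.Set.ofList t
    · have hfx : f x ∈ PySem.Set.ofList (t.map f) :=
        (PySem.Set.mem_ofList _ _).mpr
          (List.mem_map_of_mem ((PySem.Set.mem_ofList _ _).mp hx))
      rw [PySem.Set.add_of_mem hx, ih, PySem.Set.add_of_mem hfx]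
    · rw [PySem.Set.add_of_not_mem hx, List.map_append, List.map_cons, List.map_nil,
        PySem.Set.ofList_append_singleton, ih]

-- on pairs sharing one first component, dedup is determined by the second components
theorem ofList_map_snd {α β : Type} [BEq α] [LawfulBEq α] [BEq β] [LawfulBEq β]
    (k : α) (m : List (α × β)) (h : ∀ q ∈ m, q.1 = k) :
    PySem.Set.ofList (m.map Prod.snd) = (PySem.Set.ofList m).map Prod.snd := by
  induction m with
  | nil => rfl
  | cons q t ih =>
    simp only [List.map_cons, PySem.Set.ofList_cons, PySem.Set.discard,
      ih (fun r hr => h r (List.mem_cons_of_mem _ hr)), List.filter_map]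
    congr 2
    refine List.filter_congr (fun y hy => ?_)
    have hy1 : y.1 = q.1 := by
      rw [h y (List.mem_cons_of_mem _ ((PySem.Set.mem_ofList t y).mp hy)), h q (List.mem_cons_self ..)]
    show (!y.2 == q.2) = (!y == q)
    by_cases hyx : y = q
    · simp [hyx]
    · have h2 : y.2 ≠ q.2 := fun hc => hyx (Prod.ext hy1 hc)
      simp [beq_eq_false_iff_ne.mpr hyx, beq_eq_false_iff_ne.mpr h2]

-- value at c of A's grouping loop: the set of vf-values of the entries keyed to c, in order
theorem getD_foldl_modify_add {β κ ν : Type} [BEq κ] [LawfulBEq κ] [DecidableEq κ] [BEq ν]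
    (kf : β → κ) (vf : β → ν) (m : List β) (d : PySem.Dict κ (PySem.Set ν)) (c : κ) :
    (m.foldl (fun d x => d.modify (kf x) PySem.Set.empty (fun s => s.add (vf x))) d).getD c PySem.Set.empty
      = PySem.Set.update (d.getD c PySem.Set.empty) ((m.filter (fun x => kf x == c)).map vf) := by
  induction m generalizing d with
  | nil => rfl
  | cons x t ih =>
    simp only [List.foldl_cons, ih, List.filter_cons]
    by_cases hx : kf x = c
    · simp [hx, PySem.Set.update_cons]
    · simp [beq_eq_false_iff_ne.mpr hx, PySem.Dict.getD_modify, Ne.symm hx]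

-- A's result as a canonical form: Counter of the refs of the first-occurrence (ref, pin) pairs
theorem A_eq_counter (pads : List (List (String × String))) :
    count_component_pins pads
      = (PySem.Dict.counter ((PySem.Set.ofList
          ((pads.filter (fun p => decide (padGet p "ref" ≠ "" ∧ padGet p "pin" ≠ ""))).map
            (fun p => (padGet p "ref", padGet p "pin")))).map (fun q => q.1))).items := by
  unfold count_component_pins
  rw [PySem.List.foldl_ite_eq_foldl_filter]
  generalize (pads.filter (fun p => decide (padGet p "ref" ≠ "" ∧ padGet p "pin" ≠ ""))) = m
  have hnodup : ((m.foldl (fun d p =>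
      d.modify (padGet p "ref") PySem.Set.empty (fun s => s.add (padGet p "pin")))
      (PySem.Dict.empty : PySem.Dict String (PySem.Set String))).keys).Nodup := by
    apply PySem.Dict.nodup_keys_foldl_modify_key
    exact PySem.Dict.nodup_keys_empty
  rw [PySem.Dict.items_eq_map_keys _ hnodup PySem.Set.empty,
      PySem.Dict.keys_foldl_modify_key, PySem.Dict.items_counter]
  simp only [PySem.Dict.keys_empty, PySem.Set.update_nil_left, List.map_map]
  have hkeys : PySem.Set.ofList (m.map (fun p => padGet p "ref"))
      = PySem.Set.ofList ((PySem.Set.ofList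
          (m.map (fun p => (padGet p "ref", padGet p "pin")))).map (fun q => q.1)) := by
    rw [ofList_map_ofList, List.map_map]; rfl
  rw [hkeys]
  refine List.map_congr_left (fun k _ => ?_)
  simp only [Function.comp]
  congr 1
  rw [getD_foldl_modify_add (fun p => padGet p "ref") (fun p => padGet p "pin") m _ k,
      PySem.Dict.getD_empty, PySem.Set.update_empty, PySem.Set.len]
  have hfil : (m.filter (fun p => padGet p "ref" == k)).map (fun p => padGet p "pin")
      = ((m.map (fun p => (padGet p "ref", padGet p "pin"))).filter
          (fun q => q.1 == k)).map Prod.snd := by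
    rw [List.filter_map, List.map_map]; rfl
  have hcnt : List.count k ((PySem.Set.ofList
        (m.map (fun p => (padGet p "ref", padGet p "pin")))).map (fun q => q.1))
      = (PySem.Set.ofList ((m.map (fun p => (padGet p "ref", padGet p "pin"))).filter
          (fun q => q.1 == k))).length := by
    rw [ofList_filter, List.count_eq_countP, List.countP_map, List.countP_eq_length_filter]
    rfl
  rw [hfil, hcnt,
      ofList_map_snd k ((m.map (fun p => (padGet p "ref", padGet p "pin"))).filter
          (fun q => q.1 == k))
        (fun q hq => by simpa using (List.mem_filter.mp hq).2),
      List.length_map]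

-- B's prefix-scan loop builds exactly the Counter of the refs of the first-occurrence valid pairs
theorem enumFold_eq_counter (l : List (String × String)) :
    (PySem.List.enumerate l).foldl (fun counts iq =>
        if iq.2.1 ≠ "" ∧ iq.2.2 ≠ "" ∧ iq.2 ∉ PySem.List.slice l none (some iq.1) then
          counts.insert iq.2.1 (counts.getD iq.2.1 0 + 1)
        else counts) (PySem.Dict.empty : PySem.Dict String Int)
      = PySem.Dict.counter ((PySem.Set.ofList
          (l.filter (fun q => decide (q.1 ≠ "" ∧ q.2 ≠ "")))).map (fun q => q.1)) := by
  rw [← PySem.Dict.foldl_insert_getD_add_one_eq_counter]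
  induction l using List.reverseRecOn with
  | nil => rfl
  | append_singleton t x ih =>
    rw [PySem.List.enumerate_append, List.foldl_append]
    have hpre : ∀ (d : PySem.Dict String Int),
        (PySem.List.enumerate t).foldl (fun counts iq =>
          if iq.2.1 ≠ "" ∧ iq.2.2 ≠ "" ∧ iq.2 ∉ PySem.List.slice (t ++ [x]) none (some iq.1) then
            counts.insert iq.2.1 (counts.getD iq.2.1 0 + 1) else counts) d
        = (PySem.List.enumerate t).foldl (fun counts iq =>
          if iq.2.1 ≠ "" ∧ iq.2.2 ≠ "" ∧ iq.2 ∉ PySem.List.slice t none (some iq.1) then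
            counts.insert iq.2.1 (counts.getD iq.2.1 0 + 1) else counts) d := by
      intro d
      refine PySem.List.foldl_congr_mem _ _ _ _ (fun acc iq hmem => ?_)
      obtain ⟨k, hk, rfl⟩ := (PySem.List.mem_enumerate_iff t 0 iq).mp hmem
      have hsl : PySem.List.slice (t ++ [x]) none (some ((0 : Int) + (k : Int)))
          = PySem.List.slice t none (some ((0 : Int) + (k : Int))) := by
        rw [zero_add, PySem.List.slice_to_natCast, PySem.List.slice_to_natCast,
          List.take_append_of_le_length (le_of_lt hk)]
      rw [hsl]
    rw [hpre, ih]
    -- last step: index t.length, prefix slice is exactly t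
    have hx : PySem.List.enumerate [x] ((0 : Int) + (t.length : Int)) = [((t.length : Int), x)] := by
      simp [PySem.List.enumerate]
    rw [hx, List.foldl_cons, List.foldl_nil,
        PySem.List.slice_to_natCast (t ++ [x]) t.length, List.take_left]
    rw [List.filter_append]
    by_cases hg : x.1 ≠ "" ∧ x.2 ≠ ""
    · have hfx : List.filter (fun q => decide (q.1 ≠ "" ∧ q.2 ≠ "")) [x] = [x] := by
        simp [hg.1, hg.2]
      rw [hfx, PySem.Set.ofList_append_singleton]
      by_cases hmem : x ∈ t
      · have hmem' : x ∈ PySem.Set.ofList (t.filter (fun q => decide (q.1 ≠ "" ∧ q.2 ≠ ""))) := by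
          rw [PySem.Set.mem_ofList, List.mem_filter]
          exact ⟨hmem, by simp [hg.1, hg.2]⟩
        rw [if_neg (by tauto), PySem.Set.add_of_mem hmem']
      · have hmem' : x ∉ PySem.Set.ofList (t.filter (fun q => decide (q.1 ≠ "" ∧ q.2 ≠ ""))) := by
          rw [PySem.Set.mem_ofList, List.mem_filter]
          exact fun hc => hmem hc.1
        rw [if_pos ⟨hg.1, hg.2, hmem⟩, PySem.Set.add_of_not_mem hmem',
            List.map_append, List.foldl_append]
        rfl
    · have hfx : List.filter (fun q => decide (q.1 ≠ "" ∧ q.2 ≠ "")) [x] = [] := by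
        simp only [List.filter_cons, List.filter_nil]
        rw [if_neg (by simpa using hg)]
      rw [hfx, List.append_nil, if_neg (by tauto)]

-- ===== VERDICT (by name: the statement is the Claim_ definition above) =====
theorem count_component_pins_spec : Claim_equal_count_component_pins := by
  intro pads _
  unfold Spec_count_component_pins count_component_pins_alt
  rw [A_eq_counter]
  show _ = ((PySem.List.enumerate (pads.map fun p => (padGet p "ref", padGet p "pin"))).foldl
      (fun counts iq =>
        if iq.2.1 ≠ "" ∧ iq.2.2 ≠ "" ∧ iq.2 ∉ PySem.List.slice
            (pads.map fun p => (padGet p "ref", padGet p "pin")) none (some iq.1) then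
          counts.insert iq.2.1 (counts.getD iq.2.1 0 + 1)
        else counts) (PySem.Dict.empty : PySem.Dict String Int)).items
  rw [enumFold_eq_counter]
  rw [List.filter_map]
  rfl
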